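-- pv_equiv track=rewrite | github.com/zeynepcerrahoglu/Chess-Tournament-Management-System | 05190000033.py | renk_kuralina_uygun_mu
-- ===== SOURCE A (Python) =====
-- def renk_kuralina_uygun_mu(oyuncu_dic, renk, kisi):
--
--     durum = True  # False olduğunda uygun olmadığı anlaşılır
--     siyah, beyaz = 0, 0  # Daha önceden alınan siyah ve beyaz renk sayıları bu değişkenlerde tutulur.
--     # Her eşleştirme yapılmadan önce ya oyuncu için ya da rakip için kontrol edilir
--     value = oyuncu_dic.get(kisi)
--
--     for i in value[::-1]:
--         if i[1] == "b":
--             beyaz += 1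
--         elif i[1] == "s":
--             siyah += 1
--
--         # Üst üste üç kez aynı rengi alamaz
--         if beyaz == 2 and siyah == 0 and renk == "b":
--             return False
--         elif siyah == 2 and beyaz == 0 and renk == "s":
--             return False
--
--     #  Bir oyuncu bir rengi diğerinden en çok 2 kez fazla alabilir
--     if renk == "s" and beyaz + 1 - siyah > 2:
--         durum = False
--     elif renk == "b" and siyah + 1 - beyaz > 2:
--         durum = False
--
--     return durum
-- ===== SOURCE B (Python) =====
-- def renk_kuralina_uygun_mu(oyuncu_dic, renk, kisi):
--     # Forward single-pass state machine: signed balance (white minus black),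
--     # the color of the most recent colored game and the length of its streak.
--     bal = 0       # (# of 'b') - (# of 's')
--     last = None   # color of the most recent colored game
--     run = 0       # length of the current same-color streak
--     for oyun in oyuncu_dic[kisi]:
--         sonuc = oyun[1]
--         if sonuc == "b":
--             bal += 1
--         elif sonuc == "s":
--             bal -= 1
--         else:
--             continue
--         run = run + 1 if sonuc == last else 1
--         last = sonuc
--     if last == renk and run >= 2:
--         return False  # the last two colored games already had this color
--     if renk == "s":
--         return bal <= 1
--     if renk == "b":
--         return bal >= -1
--     return True
-- ===== Notes on version B (the rewrite author's own statement) =====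
-- stated objective: alternative
-- what changed: A's reversed-order loop with two separate color counters and an early return inside the loop is replaced by a forward single-pass state machine that maintains a signed balance (white minus black) together with the current same-color streak, and makes the whole decision once from the final state.
import Mathlib
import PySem

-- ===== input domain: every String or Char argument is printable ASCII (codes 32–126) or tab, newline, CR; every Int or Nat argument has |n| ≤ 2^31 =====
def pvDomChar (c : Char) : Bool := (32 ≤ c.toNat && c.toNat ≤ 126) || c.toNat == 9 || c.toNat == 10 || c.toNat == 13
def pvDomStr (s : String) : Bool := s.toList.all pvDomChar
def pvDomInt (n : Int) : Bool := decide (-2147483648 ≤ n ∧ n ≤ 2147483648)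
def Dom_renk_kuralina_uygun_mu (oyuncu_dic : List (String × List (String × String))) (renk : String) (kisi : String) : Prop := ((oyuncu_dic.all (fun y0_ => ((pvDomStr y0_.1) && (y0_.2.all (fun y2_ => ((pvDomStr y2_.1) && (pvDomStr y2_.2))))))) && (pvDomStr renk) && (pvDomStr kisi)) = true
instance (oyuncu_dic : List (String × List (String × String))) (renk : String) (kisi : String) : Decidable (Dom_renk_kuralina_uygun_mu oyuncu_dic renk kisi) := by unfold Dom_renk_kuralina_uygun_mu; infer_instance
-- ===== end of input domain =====

-- B replaces A's reversed loop (two counters + early return inside the loop) by a forward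
-- single-pass state machine (signed balance + current same-color streak), deciding once
-- from the final state; objective: alternative.

-- ===== PORT A =====
-- the for-loop over value[::-1]: running counters siyah/beyaz, early `return False`,
-- then the post-loop "at most 2 more of one color" check (A's `durum`)
def pvGoA (renk : String) : List (String × String) → Int → Int → Bool
  | [], siyah, beyaz =>
      if renk = "s" ∧ beyaz + 1 - siyah > 2 then false
      else if renk = "b" ∧ siyah + 1 - beyaz > 2 then false
      else true
  | i :: rest, siyah, beyaz =>
      let sb := if i.2 = "b" then (siyah, beyaz + 1)
                else if i.2 = "s" then (siyah + 1, beyaz)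
                else (siyah, beyaz)
      if sb.2 = 2 ∧ sb.1 = 0 ∧ renk = "b" then false
      else if sb.1 = 2 ∧ sb.2 = 0 ∧ renk = "s" then false
      else pvGoA renk rest sb.1 sb.2

def renk_kuralina_uygun_mu (oyuncu_dic : List (String × List (String × String))) (renk : String) (kisi : String) : Bool :=
  match PySem.Dict.get? ⟨oyuncu_dic⟩ kisi with
  | none => false  -- Python: value = None, `None[::-1]` raises TypeError; excluded by Pre_
  | some value =>
    match PySem.List.slice? value none none (-1) with
    | none => false  -- unreachable: step = -1 ≠ 0
    | some rev => pvGoA renk rev 0 0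

-- ===== PORT B =====
-- one loop iteration of Source B: update bal (or `continue`), then the streak (run/last)
def pvStepB (st : Int × Option String × Int) (oyun : String × String) : Int × Option String × Int :=
  let sonuc := oyun.2
  match (if sonuc = "b" then some (st.1 + 1)
         else if sonuc = "s" then some (st.1 - 1)
         else none) with
  | none => st   -- `continue`
  | some bal => (bal, some sonuc, if st.2.1 = some sonuc then st.2.2 + 1 else 1)

def renk_kuralina_uygun_mu_alt (oyuncu_dic : List (String × List (String × String))) (renk : String) (kisi : String) : Bool :=
  match PySem.Dict.get? ⟨oyuncu_dic⟩ kisi with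
  | none => false  -- Python: oyuncu_dic[kisi] raises KeyError; excluded by Pre_
  | some value =>
    let st := value.foldl pvStepB (0, none, 0)
    if st.2.1 = some renk ∧ 2 ≤ st.2.2 then false
    else if renk = "s" then decide (st.1 ≤ 1)
    else if renk = "b" then decide (-1 ≤ st.1)
    else true

-- ===== PRECONDITION & SPEC =====
-- Pre_ excludes inputs where kisi is not a key of oyuncu_dic: there A's .get returns None and
-- `None[::-1]` raises TypeError (B raises KeyError).
def Pre_renk_kuralina_uygun_mu (oyuncu_dic : List (String × List (String × String))) (renk : String) (kisi : String) : Prop :=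
  kisi ∈ oyuncu_dic.map Prod.fst
instance (oyuncu_dic : List (String × List (String × String))) (renk : String) (kisi : String) : Decidable (Pre_renk_kuralina_uygun_mu oyuncu_dic renk kisi) := by unfold Pre_renk_kuralina_uygun_mu; infer_instance
def pvWitness_renk_kuralina_uygun_mu : (List (String × List (String × String))) × String × String :=
  ([("ali", [("1", "b"), ("2", "s")])], "b", "ali")

def Spec_renk_kuralina_uygun_mu (oyuncu_dic : List (String × List (String × String))) (renk : String) (kisi : String) (out : Bool) : Prop := out = renk_kuralina_uygun_mu_alt oyuncu_dic renk kisi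
instance (oyuncu_dic : List (String × List (String × String))) (renk : String) (kisi : String) (out : Bool) : Decidable (Spec_renk_kuralina_uygun_mu oyuncu_dic renk kisi out) := by unfold Spec_renk_kuralina_uygun_mu; infer_instance

-- ===== CLAIM (what is proved, stated in full; the proofs are below) =====
def Claim_equal_renk_kuralina_uygun_mu : Prop := ∀ (oyuncu_dic : List (String × List (String × String))) (renk : String) (kisi : String), Dom_renk_kuralina_uygun_mu oyuncu_dic renk kisi → Pre_renk_kuralina_uygun_mu oyuncu_dic renk kisi → Spec_renk_kuralina_uygun_mu oyuncu_dic renk kisi (renk_kuralina_uygun_mu oyuncu_dic renk kisi)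

-- ===== LEMMAS AND PROOFS =====

-- A's post-loop check, as a function (proof helper)
def pvFinal (renk : String) (siyah beyaz : Int) : Bool :=
  if renk = "s" ∧ beyaz + 1 - siyah > 2 then false
  else if renk = "b" ∧ siyah + 1 - beyaz > 2 then false
  else true

-- A's loop specialised to the color list
def pvGoC (renk : String) : List String → Int → Int → Bool
  | [], siyah, beyaz => pvFinal renk siyah beyaz
  | c :: rest, siyah, beyaz =>
      let s' := if c = "s" then siyah + 1 else siyah
      let b' := if c = "b" then beyaz + 1 else beyaz
      if b' = 2 ∧ s' = 0 ∧ renk = "b" then false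
      else if s' = 2 ∧ b' = 0 ∧ renk = "s" then false
      else pvGoC renk rest s' b'

-- common intermediate spec: the result as a function of the colored-color list
def pvBodyB (renk : String) (colored : List String) : Bool :=
  if colored.length ≥ 2 ∧ (renk == "b" || renk == "s") = true ∧
      PySem.List.pyGet? colored (-1) = some renk ∧ PySem.List.pyGet? colored (-2) = some renk then
    false
  else
    if renk = "s" then decide ((colored.count "b" : Int) + 1 - (colored.count "s" : Int) ≤ 2)
    else if renk = "b" then decide ((colored.count "s" : Int) + 1 - (colored.count "b" : Int) ≤ 2)
    else true

lemma pvGoA_eq_pvGoC (renk : String) (l : List (String × String)) (s b : Int) :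
    pvGoA renk l s b = pvGoC renk (l.map (fun g => g.2)) s b := by
  induction l generalizing s b with
  | nil => rfl
  | cons i rest ih =>
    simp only [pvGoA, pvGoC, List.map_cons]
    by_cases hb : i.2 = "b" <;> by_cases hs : i.2 = "s" <;>
      simp [hb, hs, ih]

lemma pvGoC_filter (renk : String) (l : List String) (s b : Int)
    (hb : ¬(b = 2 ∧ s = 0 ∧ renk = "b")) (hs : ¬(s = 2 ∧ b = 0 ∧ renk = "s")) :
    pvGoC renk l s b = pvGoC renk (l.filter (fun c => c == "b" || c == "s")) s b := by
  induction l generalizing s b with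
  | nil => rfl
  | cons c rest ih =>
    by_cases hcol : (c == "b" || c == "s") = true
    · have hf : List.filter (fun c => c == "b" || c == "s") (c :: rest)
          = c :: List.filter (fun c => c == "b" || c == "s") rest := by
        simp [hcol]
      rw [hf]
      simp only [pvGoC]
      split_ifs <;> first | rfl | exact ih _ _ (by assumption) (by assumption)
    · have hcb : ¬ c = "b" := by simpa using fun h => hcol (by simp [h])
      have hcs : ¬ c = "s" := by simpa using fun h => hcol (by simp [h])
      have hf : List.filter (fun c => c == "b" || c == "s") (c :: rest)
          = List.filter (fun c => c == "b" || c == "s") rest := by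
        simp [hcol]
      rw [hf]
      simp only [pvGoC, if_neg hcb, if_neg hcs]
      rw [if_neg hb, if_neg hs]
      exact ih _ _ hb hs

lemma pvGoC_total (renk : String) (cs : List String) (s b : Int)
    (hcs : ∀ c ∈ cs, c = "b" ∨ c = "s") (hs0 : 0 ≤ s) (hb0 : 0 ≤ b)
    (Hb : renk = "b" → s ≠ 0 ∨ 2 ≤ b) (Hs : renk = "s" → b ≠ 0 ∨ 2 ≤ s) :
    pvGoC renk cs s b = pvFinal renk (s + cs.count "s") (b + cs.count "b") := by
  induction cs generalizing s b with
  | nil => simp [pvGoC]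
  | cons c rest ih =>
    have hmem := hcs c (by simp)
    have hrest : ∀ c ∈ rest, c = "b" ∨ c = "s" := fun c hc => hcs c (by simp [hc])
    rcases hmem with hcb | hcs'
    · subst hcb
      have h1 : ¬(b + 1 = 2 ∧ s = 0 ∧ renk = "b") := by
        rintro ⟨h2, hz, hr⟩
        rcases Hb hr with h | h
        · exact h hz
        · omega
      have h2 : ¬(s = 2 ∧ b + 1 = 0 ∧ renk = "s") := by rintro ⟨_, h, _⟩; omega
      simp only [pvGoC, String.reduceEq, reduceIte, if_neg h1, if_neg h2]
      rw [ih _ _ hrest hs0 (by omega)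
        (fun hr => (Hb hr).imp id (by omega))
        (fun hr => Or.inl (by omega))]
      simp
      congr 1
      ring
    · subst hcs'
      have h1 : ¬(b = 2 ∧ s + 1 = 0 ∧ renk = "b") := by rintro ⟨_, h, _⟩; omega
      have h2 : ¬(s + 1 = 2 ∧ b = 0 ∧ renk = "s") := by
        rintro ⟨h3, hz, hr⟩
        rcases Hs hr with h | h
        · exact h hz
        · omega
      simp only [pvGoC, String.reduceEq, reduceIte, if_neg h1, if_neg h2]
      rw [ih _ _ hrest (by omega) hb0
        (fun hr => Or.inl (by omega))
        (fun hr => (Hs hr).imp id (by omega))]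
      simp
      congr 1
      ring

-- B's final branch chain equals A's pvFinal
lemma pvFinal_eq_branches (renk : String) (s b : Int) :
    pvFinal renk s b =
      (if renk = "s" then decide (b + 1 - s ≤ 2)
       else if renk = "b" then decide (s + 1 - b ≤ 2)
       else true) := by
  unfold pvFinal
  by_cases hs : renk = "s" <;> by_cases hb : renk = "b" <;>
    by_cases h1 : (2 : Int) < b + 1 - s <;> by_cases h2 : (2 : Int) < s + 1 - b <;>
      simp [hs, hb, h1, h2] <;> omega

lemma pre_get?_isSome (oyuncu_dic : List (String × List (String × String))) (kisi : String)
    (h : kisi ∈ oyuncu_dic.map Prod.fst) :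
    (PySem.Dict.get? (⟨oyuncu_dic⟩ : PySem.Dict String (List (String × String))) kisi).isSome := by
  induction oyuncu_dic with
  | nil => simp at h
  | cons p rest ih =>
    rw [PySem.Dict.get?_mk_cons]
    by_cases hp : p.1 == kisi
    · simp [hp]
    · rw [if_neg hp]
      apply ih
      simp only [List.map_cons, List.mem_cons] at h
      rcases h with h | h
      · exact absurd (by simp [h]) hp
      · exact h

lemma pvStep_b (renk : String) (rest : List String) (s b : Int)
    (h1 : ¬(b + 1 = 2 ∧ s = 0 ∧ renk = "b")) (h2 : ¬(s = 2 ∧ b + 1 = 0 ∧ renk = "s")) :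
    pvGoC renk ("b" :: rest) s b = pvGoC renk rest s (b + 1) := by
  simp only [pvGoC, String.reduceEq, reduceIte, if_neg h1, if_neg h2]

lemma pvStep_s (renk : String) (rest : List String) (s b : Int)
    (h1 : ¬(b = 2 ∧ s + 1 = 0 ∧ renk = "b")) (h2 : ¬(s + 1 = 2 ∧ b = 0 ∧ renk = "s")) :
    pvGoC renk ("s" :: rest) s b = pvGoC renk rest (s + 1) b := by
  simp only [pvGoC, String.reduceEq, reduceIte, if_neg h1, if_neg h2]

-- A's loop over the reversed colored list equals the common intermediate spec
lemma main_colored (renk : String) (colored : List String)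
    (hcol : ∀ c ∈ colored, c = "b" ∨ c = "s") :
    pvGoC renk colored.reverse 0 0 = pvBodyB renk colored := by
  rcases hrev : colored.reverse with _ | ⟨c1, t⟩
  · have hc : colored = [] := by simpa using congrArg List.reverse hrev
    subst hc
    simp [pvGoC, pvBodyB, pvFinal_eq_branches]
  · rcases t with _ | ⟨c2, rest⟩
    · have hc : colored = [c1] := by simpa using congrArg List.reverse hrev
      subst hc
      rcases hcol c1 (by simp) with e | e <;> subst e <;>
        simp [pvGoC, pvBodyB, pvFinal]
    · -- colored has at least two elements; colored = (c1 :: c2 :: rest).reverse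
      have hc : colored = (c1 :: c2 :: rest).reverse := by
        simpa using congrArg List.reverse hrev
      subst hc
      have hget1 : PySem.List.pyGet? ((c1 :: c2 :: rest).reverse) (-1) = some c1 := by
        rw [PySem.List.pyGet?_neg_one]; simp
      have hget2 : PySem.List.pyGet? ((c1 :: c2 :: rest).reverse) (-2) = some c2 := by
        rw [PySem.List.pyGet?_neg_ofNat _ 2 (by omega) (by simp)]
        simp
      have hlen : ((c1 :: c2 :: rest).reverse).length ≥ 2 := by simp
      have hc1 : c1 = "b" ∨ c1 = "s" := hcol c1 (by simp)
      have hc2 : c2 = "b" ∨ c2 = "s" := hcol c2 (by simp)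
      by_cases htrig : (renk == "b" || renk == "s") = true ∧ c1 = renk ∧ c2 = renk
      · obtain ⟨hbs, h1, h2⟩ := htrig
        rw [pvBodyB, if_pos ⟨hlen, hbs, by rw [hget1, h1], by rw [hget2, h2]⟩]
        subst h1 h2
        rcases hc1 with e | e <;> rw [e] <;> simp [pvGoC]
      · rw [pvBodyB, if_neg (by
          rintro ⟨-, hbs, hg1, hg2⟩
          rw [hget1] at hg1
          rw [hget2] at hg2
          exact htrig ⟨hbs, Option.some_injective _ hg1, Option.some_injective _ hg2⟩)]
        have hcountb : ((c1 :: c2 :: rest).reverse).count "b" = (c1 :: c2 :: rest).count "b" :=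
          List.count_reverse
        have hcounts : ((c1 :: c2 :: rest).reverse).count "s" = (c1 :: c2 :: rest).count "s" :=
          List.count_reverse
        rw [← pvFinal_eq_branches, hcountb, hcounts]
        rcases hc1 with e1 | e1 <;> rcases hc2 with e2 | e2 <;> subst e1 <;> subst e2
        · have hrb : renk ≠ "b" := fun hr => htrig ⟨by simp [hr], hr.symm, hr.symm⟩
          rw [pvStep_b _ _ _ _ (by rintro ⟨h, -⟩; omega) (by rintro ⟨-, h, -⟩; omega),
            pvStep_b _ _ _ _ (by rintro ⟨-, -, hr⟩; exact hrb hr) (by rintro ⟨-, h, -⟩; omega),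
            pvGoC_total _ _ _ _ (fun c hc => hcol c (by simp [hc]))
              (by omega) (by omega) (fun hr => absurd hr hrb) (fun _ => Or.inl (by omega))]
          congr 1 <;> simp <;> try ring
        · rw [pvStep_b _ _ _ _ (by rintro ⟨h, -⟩; omega) (by rintro ⟨-, h, -⟩; omega),
            pvStep_s _ _ _ _ (by rintro ⟨h, -⟩; omega) (by rintro ⟨-, h, -⟩; omega),
            pvGoC_total _ _ _ _ (fun c hc => hcol c (by simp [hc]))
              (by omega) (by omega) (fun _ => Or.inl (by omega)) (fun _ => Or.inl (by omega))]
          congr 1 <;> simp <;> try ring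
        · rw [pvStep_s _ _ _ _ (by rintro ⟨h, -⟩; omega) (by rintro ⟨h, -⟩; omega),
            pvStep_b _ _ _ _ (by rintro ⟨-, h, -⟩; omega) (by rintro ⟨h, -⟩; omega),
            pvGoC_total _ _ _ _ (fun c hc => hcol c (by simp [hc]))
              (by omega) (by omega) (fun _ => Or.inl (by omega)) (fun _ => Or.inl (by omega))]
          congr 1 <;> simp <;> try ring
        · have hrs : renk ≠ "s" := fun hr => htrig ⟨by simp [hr], hr.symm, hr.symm⟩
          rw [pvStep_s _ _ _ _ (by rintro ⟨h, -⟩; omega) (by rintro ⟨h, -⟩; omega),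
            pvStep_s _ _ _ _ (by rintro ⟨h, -⟩; omega) (by rintro ⟨-, -, hr⟩; exact hrs hr),
            pvGoC_total _ _ _ _ (fun c hc => hcol c (by simp [hc]))
              (by omega) (by omega) (fun _ => Or.inl (by omega)) (fun hr => absurd hr hrs)]
          congr 1 <;> simp <;> try ring

-- ===== B-side lemmas =====

-- B's step specialised to the color list
def pvStepC (st : Int × Option String × Int) (c : String) : Int × Option String × Int :=
  match (if c = "b" then some (st.1 + 1)
         else if c = "s" then some (st.1 - 1)
         else none) with
  | none => st
  | some bal => (bal, some c, if st.2.1 = some c then st.2.2 + 1 else 1)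

-- B's final decision, as a function of the final state (proof helper)
def pvDecide (renk : String) (st : Int × Option String × Int) : Bool :=
  if st.2.1 = some renk ∧ 2 ≤ st.2.2 then false
  else if renk = "s" then decide (st.1 ≤ 1)
  else if renk = "b" then decide (-1 ≤ st.1)
  else true

lemma stepB_eq_stepC (st : Int × Option String × Int) (g : String × String) :
    pvStepB st g = pvStepC st g.2 := rfl

-- the fold over the game list equals the fold over the colored-color list
lemma foldB_eq_foldC (l : List (String × String)) (st : Int × Option String × Int) :
    l.foldl pvStepB st
      = (((l.filter (fun g => g.2 == "b" || g.2 == "s")).map (fun g => g.2)).foldl pvStepC st) := by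
  induction l generalizing st with
  | nil => rfl
  | cons g rest ih =>
    by_cases hcol : (g.2 == "b" || g.2 == "s") = true
    · simp only [List.foldl_cons, List.filter_cons, hcol, if_pos, List.map_cons]
      rw [stepB_eq_stepC]
      exact ih _
    · have hb : ¬ g.2 = "b" := by simpa using fun h => hcol (by simp [h])
      have hs : ¬ g.2 = "s" := by simpa using fun h => hcol (by simp [h])
      simp only [List.foldl_cons, List.filter_cons, hcol]
      rw [stepB_eq_stepC]
      simp only [pvStepC, if_neg hb, if_neg hs]
      exact ih _
  
lemma foldC_bal (cs : List String) (st : Int × Option String × Int)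
    (hcs : ∀ c ∈ cs, c = "b" ∨ c = "s") :
    (cs.foldl pvStepC st).1 = st.1 + (cs.count "b" : Int) - (cs.count "s" : Int) := by
  induction cs generalizing st with
  | nil => simp
  | cons c rest ih =>
    have hrest : ∀ c ∈ rest, c = "b" ∨ c = "s" := fun c hc => hcs c (by simp [hc])
    rcases hcs c (by simp) with e | e <;> subst e <;>
      simp only [List.foldl_cons, pvStepC, String.reduceEq, reduceIte] <;>
      rw [ih _ hrest] <;> simp [List.count_cons] <;> ring

lemma foldC_run_nonneg (cs : List String) (st : Int × Option String × Int)
    (h : 0 ≤ st.2.2) : 0 ≤ (cs.foldl pvStepC st).2.2 := by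
  induction cs generalizing st with
  | nil => exact h
  | cons c rest ih =>
    refine ih _ ?_
    unfold pvStepC
    rcases hb : (if c = "b" then some (st.1 + 1)
         else if c = "s" then some (st.1 - 1)
         else none) with _ | bal
    · exact h
    · simp only
      split_ifs <;> omega

-- after a colored step, last = that color and run ≥ 1
lemma stepC_colored (st : Int × Option String × Int) (c : String)
    (hc : c = "b" ∨ c = "s") (h0 : 0 ≤ st.2.2) :
    (pvStepC st c).2.1 = some c ∧ 1 ≤ (pvStepC st c).2.2 ∧
      (pvStepC st c).2.2 = (if st.2.1 = some c then st.2.2 + 1 else 1) := by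
  rcases hc with e | e <;> subst e <;>
    refine ⟨by simp [pvStepC], ?_, by simp [pvStepC]⟩ <;>
    simp only [pvStepC, String.reduceEq, reduceIte] <;> split_ifs <;> omega

-- B's decision on the folded state equals the common intermediate spec
lemma decideB_eq_body (renk : String) (colored : List String)
    (hcol : ∀ c ∈ colored, c = "b" ∨ c = "s") :
    pvDecide renk (colored.foldl pvStepC (0, none, 0)) = pvBodyB renk colored := by
  rcases hrev : colored.reverse with _ | ⟨c1, t⟩
  · have hc : colored = [] := by simpa using congrArg List.reverse hrev
    subst hc
    by_cases hs : renk = "s" <;> by_cases hb : renk = "b" <;>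
      simp [pvDecide, pvBodyB, hs, hb]
  · rcases t with _ | ⟨c2, rest⟩
    · have hc : colored = [c1] := by simpa using congrArg List.reverse hrev
      subst hc
      rcases hcol c1 (by simp) with e | e <;> subst e <;>
        by_cases hs : renk = "s" <;> by_cases hb : renk = "b" <;>
          simp [pvDecide, pvBodyB, pvStepC, hs, hb]
    · -- colored = rest.reverse ++ [c2, c1]
      have hc : colored = rest.reverse ++ [c2, c1] := by
        have := congrArg List.reverse hrev
        simpa using this
      subst hc
      have hc1 : c1 = "b" ∨ c1 = "s" := hcol c1 (by simp)
      have hc2 : c2 = "b" ∨ c2 = "s" := hcol c2 (by simp)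
      set s0 := rest.reverse.foldl pvStepC ((0 : Int), (none : Option String), (0 : Int)) with hs0
      have hfold : (rest.reverse ++ [c2, c1]).foldl pvStepC (0, none, 0)
          = pvStepC (pvStepC s0 c2) c1 := by
        rw [List.foldl_append]; rfl
      have h0 : (0:Int) ≤ s0.2.2 := foldC_run_nonneg _ _ (by simp)
      obtain ⟨hl2, hr2, _⟩ := stepC_colored s0 c2 hc2 h0
      obtain ⟨hl1, hr1, hrun1⟩ := stepC_colored (pvStepC s0 c2) c1 hc1 (by omega)
      -- last-two membership via pyGet?
      have hget1 : PySem.List.pyGet? (rest.reverse ++ [c2, c1]) (-1) = some c1 := by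
        rw [PySem.List.pyGet?_neg_one]; simp
      have hget2 : PySem.List.pyGet? (rest.reverse ++ [c2, c1]) (-2) = some c2 := by
        rw [PySem.List.pyGet?_neg_ofNat _ 2 (by omega) (by simp)]
        simp
      have hlen : (rest.reverse ++ [c2, c1]).length ≥ 2 := by simp
      have hbal : (pvStepC (pvStepC s0 c2) c1).1
          = ((rest.reverse ++ [c2, c1]).count "b" : Int)
            - ((rest.reverse ++ [c2, c1]).count "s" : Int) := by
        have := foldC_bal (rest.reverse ++ [c2, c1]) (0, none, 0) hcol
        rw [hfold] at this
        simpa using this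
      rw [hfold]
      by_cases htrig : c1 = renk ∧ c1 = c2
      · obtain ⟨h1, h12⟩ := htrig
        have hcond : (pvStepC (pvStepC s0 c2) c1).2.1 = some renk ∧
            2 ≤ (pvStepC (pvStepC s0 c2) c1).2.2 := by
          constructor
          · rw [hl1, h1]
          · rw [hrun1, hl2, if_pos (show some c2 = some c1 by rw [h12])]; omega
        rw [pvDecide, if_pos hcond]
        have hbs : (renk == "b" || renk == "s") = true := by
          rw [← h1]; rcases hc1 with e | e <;> simp [e]
        have h2r : c2 = renk := by rw [← h12]; exact h1
        have hposc : (rest.reverse ++ [c2, c1]).length ≥ 2 ∧ (renk == "b" || renk == "s") = true ∧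
            PySem.List.pyGet? (rest.reverse ++ [c2, c1]) (-1) = some renk ∧
            PySem.List.pyGet? (rest.reverse ++ [c2, c1]) (-2) = some renk :=
          ⟨hlen, hbs, by rw [hget1, h1], by rw [hget2, h2r]⟩
        rw [pvBodyB, if_pos hposc]
      · have hcondn : ¬((pvStepC (pvStepC s0 c2) c1).2.1 = some renk ∧
            2 ≤ (pvStepC (pvStepC s0 c2) c1).2.2) := by
          rintro ⟨ha, hb⟩
          rw [hl1] at ha
          have h1 : c1 = renk := Option.some_injective _ ha
          rw [hrun1, hl2] at hb
          by_cases h12 : c1 = c2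
          · exact htrig ⟨h1, h12⟩
          · rw [if_neg (by simpa using fun h => h12 h.symm)] at hb; omega
        rw [pvDecide, if_neg hcondn]
        have hnegc : ¬((rest.reverse ++ [c2, c1]).length ≥ 2 ∧ (renk == "b" || renk == "s") = true ∧
            PySem.List.pyGet? (rest.reverse ++ [c2, c1]) (-1) = some renk ∧
            PySem.List.pyGet? (rest.reverse ++ [c2, c1]) (-2) = some renk) := by
          rintro ⟨-, -, hg1, hg2⟩
          rw [hget1] at hg1
          rw [hget2] at hg2
          exact htrig ⟨Option.some_injective _ hg1,
            (Option.some_injective _ hg1).trans (Option.some_injective _ hg2).symm⟩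
        rw [pvBodyB, if_neg hnegc]
        rw [hbal]
        split_ifs <;> first | rfl | (apply decide_eq_decide.mpr; constructor <;> intro <;> omega)

-- the colored lists seen by A (reverse-then-filter) and B (filter-then-map) coincide
lemma core_eq (renk : String) (value : List (String × String)) :
    pvGoA renk value.reverse 0 0
      = pvDecide renk (value.foldl pvStepB (0, none, 0)) := by
  have hcol : ∀ c ∈ (value.filter (fun g => g.2 == "b" || g.2 == "s")).map (fun g => g.2),
      c = "b" ∨ c = "s" := by
    intro c hc
    obtain ⟨g, hg, rfl⟩ := List.mem_map.mp hc
    have := List.of_mem_filter hg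
    simpa using this
  rw [pvGoA_eq_pvGoC, pvGoC_filter _ _ _ _ (by rintro ⟨h, -⟩; omega) (by rintro ⟨h, -⟩; omega)]
  have hlist : (value.reverse.map (fun g => g.2)).filter (fun c => c == "b" || c == "s")
      = ((value.filter (fun g => g.2 == "b" || g.2 == "s")).map (fun g => g.2)).reverse := by
    simp [List.filter_map]
    rfl
  rw [hlist, main_colored renk _ hcol, foldB_eq_foldC, decideB_eq_body renk _ hcol]

-- ===== VERDICT (by name: the statement is the Claim_ definition above) =====
theorem renk_kuralina_uygun_mu_spec : Claim_equal_renk_kuralina_uygun_mu := by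
  intro oyuncu_dic renk kisi _ hpre
  unfold Spec_renk_kuralina_uygun_mu renk_kuralina_uygun_mu renk_kuralina_uygun_mu_alt
  obtain ⟨value, hv⟩ := Option.isSome_iff_exists.mp (pre_get?_isSome oyuncu_dic kisi hpre)
  rw [hv]
  simp only [PySem.List.slice?_none_none_neg_one]
  exact core_eq renk value
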